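-- pv_equiv track=rewrite | github.com/lkj10/algorithm-study | insun/control.py | solution
-- ===== SOURCE A (Python) =====
-- def solution(s):
--     number = []
--     for i in s:
--         if number:
--             if number[-1] == i:
--                 number.pop()
--             else:
--                 number.append(i)
--         else:
--             number.append(i)
--     if number:
--         return 0
--     else:
--         return 1
-- ===== SOURCE B (Python) =====
-- def solution(s):
--     item = list(s)
--     changed = True
--     while changed:
--         changed = False
--         out = []
--         i = 0
--         n = len(item)
--         while i < n:
--             if i + 1 < n and item[i] == item[i + 1]:
--                 i += 2
--                 changed = True
--             else:
--                 out.append(item[i])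
--                 i += 1
--         item = out
--     return 1 if not item else 0
-- ===== Notes on version B (the rewrite author's own statement) =====
-- stated objective: alternative
-- what changed: Replaces the single stack pass by repeated left-to-right sweeps, each deleting every disjoint adjacent equal pair it meets, iterated until a sweep removes nothing; returns 1 iff the residual is empty.
import Mathlib
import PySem

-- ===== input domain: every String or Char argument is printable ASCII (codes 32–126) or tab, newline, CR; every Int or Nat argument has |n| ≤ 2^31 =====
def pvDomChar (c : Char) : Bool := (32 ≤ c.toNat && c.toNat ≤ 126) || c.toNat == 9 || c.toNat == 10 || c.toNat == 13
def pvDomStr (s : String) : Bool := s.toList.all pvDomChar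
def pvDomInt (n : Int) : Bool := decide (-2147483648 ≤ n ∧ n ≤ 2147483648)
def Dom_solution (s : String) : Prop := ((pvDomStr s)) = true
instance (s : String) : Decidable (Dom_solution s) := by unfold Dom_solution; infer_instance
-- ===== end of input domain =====

-- B replaces A's single stack pass by repeated full sweeps that each delete the disjoint
-- adjacent equal pairs they meet, iterated to a fixpoint; same value, different algorithm.

-- ===== PORT A =====
-- one iteration of A's for-loop over the stack `number` (top kept at the tail, as in Python)
def pvStepA (number : List Char) (i : Char) : List Char :=
  if number ≠ [] then
    if number.getLast? = some i then number.dropLast else number ++ [i]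
  else number ++ [i]

def solution (s : String) : Int :=
  let number := s.toList.foldl pvStepA []
  if number ≠ [] then 0 else 1

-- ===== PORT B =====
-- inner while-loop of Source B: one left-to-right sweep; returns (out, changed)
def pvPass : List Char → List Char × Bool
  | [] => ([], false)
  | [a] => ([a], false)
  | a :: b :: rest =>
    if a = b then ((pvPass rest).1, true)
    else
      let p := pvPass (b :: rest)
      (a :: p.1, p.2)

-- needed by pvLoop's termination: a sweep that reports a change shrank the list
theorem pvPass_length : ∀ (l : List Char), (pvPass l).1.length ≤ l.length ∧
    ((pvPass l).2 = true → (pvPass l).1.length < l.length)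
  | [] => by simp [pvPass]
  | [a] => by simp [pvPass]
  | a :: b :: rest => by
    by_cases hab : a = b
    · have := (pvPass_length rest).1
      refine ⟨?_, fun _ => ?_⟩ <;>
        · simp only [pvPass, if_pos hab, List.length_cons]
          omega
    · have h1 := (pvPass_length (b :: rest)).1
      have h2 := (pvPass_length (b :: rest)).2
      simp only [pvPass, if_neg hab, List.length_cons] at *
      constructor
      · omega
      · intro hc; have := h2 hc; omega

-- outer while-loop of Source B: sweep until a sweep removes nothing
def pvLoop (l : List Char) : List Char :=
  if h : (pvPass l).2 = true then pvLoop (pvPass l).1 else (pvPass l).1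
termination_by l.length
decreasing_by exact (pvPass_length l).2 h

def solution_alt (s : String) : Int :=
  if pvLoop s.toList = [] then 1 else 0

-- ===== PRECONDITION & SPEC =====
def Spec_solution (s : String) (out : Int) : Prop := out = solution_alt s
instance (s : String) (out : Int) : Decidable (Spec_solution s out) := by unfold Spec_solution; infer_instance

-- ===== CLAIM (what is proved, stated in full; the proofs are below) =====
def Claim_equal_solution : Prop := ∀ (s : String), Dom_solution s → Spec_solution s (solution s)

-- ===== LEMMAS AND PROOFS =====

-- A's stack with the top kept at the HEAD (A keeps it at the tail)
def pvStep (acc : List Char) (c : Char) : List Char :=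
  if acc.head? = some c then acc.tail else c :: acc

def pvRed (acc : List Char) : List Char → List Char
  | [] => acc
  | c :: l => pvRed (pvStep acc c) l

theorem pvStepA_reverse (r : List Char) (c : Char) :
    pvStepA r.reverse c = (pvStep r c).reverse := by
  cases r with
  | nil => simp [pvStepA, pvStep]
  | cons a t =>
    by_cases h : a = c <;>
      simp [pvStepA, pvStep, h, List.getLast?_reverse, List.dropLast_reverse]

theorem pvFoldA_eq_red : ∀ (l r : List Char), l.foldl pvStepA r.reverse = (pvRed r l).reverse
  | [], r => by simp [pvRed]
  | c :: l, r => by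
    rw [List.foldl_cons, pvStepA_reverse, pvFoldA_eq_red l (pvStep r c)]
    rfl

-- one stack step keeps the stack free of adjacent equal letters
theorem pvStep_chain (acc : List Char) (c : Char) (h : acc.IsChain (· ≠ ·)) :
    (pvStep acc c).IsChain (· ≠ ·) := by
  by_cases hc : acc.head? = some c
  · simpa [pvStep, hc] using h.tail
  · simp only [pvStep, if_neg hc]
    exact List.isChain_cons.2 ⟨fun y hy hcy => hc (by rw [Option.mem_def.1 hy, hcy]), h⟩

-- pushing the same letter twice onto a pair-free stack is a no-op
theorem pvStep_step (acc : List Char) (c : Char) (h : acc.IsChain (· ≠ ·)) :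
    pvStep (pvStep acc c) c = acc := by
  by_cases hc : acc.head? = some c
  · cases acc with
    | nil => simp at hc
    | cons a t =>
      simp only [List.head?_cons, Option.some.injEq] at hc; subst hc
      have ht : t.head? ≠ some a := by
        intro hh
        cases t with
        | nil => simp at hh
        | cons b t' =>
          simp only [List.head?_cons, Option.some.injEq] at hh
          exact (List.isChain_cons.1 h).1 b rfl hh.symm
      simp [pvStep, ht]
  · simp [pvStep, hc]

-- one sweep does not change the stack result
theorem pvPass_red : ∀ (l acc : List Char), acc.IsChain (· ≠ ·) →
    pvRed acc (pvPass l).1 = pvRed acc l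
  | [], _, _ => rfl
  | [_], _, _ => rfl
  | a :: b :: rest, acc, h => by
    by_cases hab : a = b
    · subst hab
      simp only [pvPass, reduceIte]
      rw [pvPass_red rest acc h]
      show pvRed acc rest = pvRed (pvStep (pvStep acc a) a) rest
      rw [pvStep_step acc a h]
    · simp only [pvPass, if_neg hab]
      show pvRed (pvStep acc a) (pvPass (b :: rest)).1 = pvRed (pvStep acc a) (b :: rest)
      exact pvPass_red (b :: rest) (pvStep acc a) (pvStep_chain acc a h)

-- an unchanged sweep returns the list itself, and it is pair-free
theorem pvPass_fix : ∀ (l : List Char), (pvPass l).2 = false →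
    (pvPass l).1 = l ∧ l.IsChain (· ≠ ·)
  | [] => fun _ => ⟨rfl, List.isChain_nil⟩
  | [a] => fun _ => ⟨rfl, List.isChain_singleton a⟩
  | a :: b :: rest => by
    intro h
    by_cases hab : a = b
    · simp [pvPass, hab] at h
    · simp only [pvPass, if_neg hab] at h ⊢
      obtain ⟨h1, h2⟩ := pvPass_fix (b :: rest) h
      refine ⟨by rw [h1], List.isChain_cons.2 ⟨?_, h2⟩⟩
      intro y hy
      rw [List.head?_cons, Option.mem_def, Option.some.injEq] at hy
      subst hy; exact hab

-- the fixpoint loop preserves the stack result and ends pair-free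
theorem pvRed_loop : ∀ (l : List Char), pvRed [] (pvLoop l) = pvRed [] l := by
  intro l
  induction l using pvLoop.induct with
  | case1 l hp ih =>
    rw [pvLoop, dif_pos hp, ih, pvPass_red l [] List.isChain_nil]
  | case2 l hp =>
    rw [pvLoop, dif_neg hp, (pvPass_fix l (by simpa using hp)).1]

theorem pvLoop_chain (l : List Char) : (pvLoop l).IsChain (· ≠ ·) := by
  induction l using pvLoop.induct with
  | case1 l hp ih =>
    rw [pvLoop, dif_pos hp]; exact ih
  | case2 l hp =>
    rw [pvLoop, dif_neg hp]
    obtain ⟨h1, h2⟩ := pvPass_fix l (by simpa using hp)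
    rw [h1]; exact h2

-- on a pair-free list with a fresh head, pvRed just reverses
theorem pvRed_nopair : ∀ (m acc : List Char), m.IsChain (· ≠ ·) →
    (∀ a c, acc.head? = some a → m.head? = some c → a ≠ c) →
    pvRed acc m = m.reverse ++ acc
  | [], acc, _, _ => by simp [pvRed]
  | c :: m, acc, h, hd => by
    have hc : acc.head? ≠ some c := fun hh => hd c c hh rfl rfl
    show pvRed (pvStep acc c) m = (c :: m).reverse ++ acc
    rw [show pvStep acc c = c :: acc from by simp [pvStep, hc]]
    rw [pvRed_nopair m (c :: acc) h.tail ?_]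
    · simp [pvStep, hc]
    · intro a d ha hm
      simp only [List.head?_cons, Option.some.injEq] at ha; subst ha
      cases m with
      | nil => simp at hm
      | cons e m' =>
        simp only [List.head?_cons, Option.some.injEq] at hm; subst hm
        exact (List.isChain_cons.1 h).1 _ rfl

theorem pvKey (l : List Char) : (pvRed [] l = []) ↔ (pvLoop l = []) := by
  rw [← pvRed_loop l,
    pvRed_nopair (pvLoop l) [] (pvLoop_chain l) (by intro a c h; simp at h)]
  simp

-- ===== VERDICT (by name: the statement is the Claim_ definition above) =====
theorem solution_spec : Claim_equal_solution := by
  intro s _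
  unfold Spec_solution solution solution_alt
  have hf : s.toList.foldl pvStepA [] = (pvRed [] s.toList).reverse := by
    simpa using pvFoldA_eq_red s.toList []
  have hk := pvKey s.toList
  by_cases h : pvRed [] s.toList = []
  · simp [hf, h, hk.1 h]
  · have h2 : ¬ pvLoop s.toList = [] := fun hh => h (hk.2 hh)
    simp [hf, h, h2]
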